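-- pv_equiv track=rewrite | github.com/aratijadhav/Python | minion_game.py | all_string
-- ===== SOURCE A (Python) =====
-- def all_string(original_str,string1):
--
--     dict = {}
--
--     for i in range(0,len(string1)):
--         sub_str = ''
--
--         for j in range(0,i+1):
--             sub_str +=string1[j]
--
--         try:#if else aivji try catch kraychi idea sushlya ne dili
--             dict[sub_str] = dict[sub_str]+1
--         except:
--             dict[sub_str] = 1
--
--     return(dict)
-- ===== SOURCE B (Python) =====
-- def all_string(original_str, string1):
--     d = {}
--     sub_str = ''
--     for ch in string1:
--         sub_str += ch
--         d[sub_str] = 1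
--     return d
-- ===== Notes on version B (the rewrite author's own statement) =====
-- stated objective: faster
-- what changed: A rebuilds each prefix from scratch with a nested character-by-character loop and a try/except lookup; B threads one running prefix accumulator through a single pass over the string and sets each (always fresh) key to 1 directly.
import Mathlib
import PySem

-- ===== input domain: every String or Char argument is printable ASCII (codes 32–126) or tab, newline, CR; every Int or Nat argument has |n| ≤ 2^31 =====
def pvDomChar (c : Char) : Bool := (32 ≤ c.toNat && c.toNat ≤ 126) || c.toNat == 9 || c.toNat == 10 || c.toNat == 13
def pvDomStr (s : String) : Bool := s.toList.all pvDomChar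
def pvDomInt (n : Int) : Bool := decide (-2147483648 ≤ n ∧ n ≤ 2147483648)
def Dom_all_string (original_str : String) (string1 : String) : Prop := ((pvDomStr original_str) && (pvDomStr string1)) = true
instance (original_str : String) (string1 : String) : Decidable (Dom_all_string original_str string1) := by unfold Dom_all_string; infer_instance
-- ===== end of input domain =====

-- B replaces A's inner prefix-rebuilding loop (and its try/except lookup) by a single pass that
-- threads a running prefix accumulator; objective: simpler.

-- ===== PORT A =====
def all_string (original_str : String) (string1 : String) : List (String × Int) :=
  let l := string1.toList
  let d := (PySem.List.pyRange 0 (l.length : Int) 1).foldl (fun d i =>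
    -- sub_str = ''; for j in range(0, i+1): sub_str += string1[j]   (index always in range)
    let sub : List Char :=
      (PySem.List.pyRange 0 (i + 1) 1).foldl (fun acc j => acc ++ [PySem.List.pyGetD l j ' ']) []
    let key := String.ofList sub
    -- try: dict[sub_str] = dict[sub_str] + 1  except: dict[sub_str] = 1
    match d.get? key with
    | some v => d.insert key (v + 1)
    | none => d.insert key 1) (PySem.Dict.empty : PySem.Dict String Int)
  d.items

-- ===== PORT B =====
def all_string_alt (original_str : String) (string1 : String) : List (String × Int) :=
  (string1.toList.foldl (fun (p : PySem.Dict String Int × String) c =>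
      let sub := p.2.push c
      (p.1.insert sub 1, sub)) ((PySem.Dict.empty : PySem.Dict String Int), "")).1.items

-- ===== PRECONDITION & SPEC =====
def Spec_all_string (original_str : String) (string1 : String) (out : List (String × Int)) : Prop := out = all_string_alt original_str string1
instance (original_str : String) (string1 : String) (out : List (String × Int)) : Decidable (Spec_all_string original_str string1 out) := by unfold Spec_all_string; infer_instance

-- ===== CLAIM (what is proved, stated in full; the proofs are below) =====
def Claim_equal_all_string : Prop := ∀ (original_str : String) (string1 : String), Dom_all_string original_str string1 → Spec_all_string original_str string1 (all_string original_str string1)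

-- ===== LEMMAS AND PROOFS =====

-- the common characterisation: both dicts list the i-th prefix (length i+1) mapped to 1, in order
def pvPrefixItems (l : List Char) (n : Nat) : List (String × Int) :=
  (List.range n).map (fun i => (String.ofList (l.take (i + 1)), 1))

theorem take_eq_map_range (l : List Char) (m : Nat) (h : m ≤ l.length) :
    (List.range m).map (fun k => l.getD k ' ') = l.take m := by
  apply List.ext_getElem
  · simp [h]
  · intro i h1 h2
    simp only [List.getElem_map, List.getElem_range, List.getElem_take]
    rw [List.getD_eq_getElem _ _ (by simp at h1; omega)]

-- A's inner loop rebuilds the (i+1)-character prefix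
theorem pv_inner (l : List Char) (i : Nat) (hi : i < l.length) :
    (PySem.List.pyRange 0 ((i : Int) + 1) 1).foldl
      (fun acc j => acc ++ [PySem.List.pyGetD l j ' ']) [] = l.take (i + 1) := by
  rw [PySem.List.foldl_append_singleton_eq_map, PySem.List.pyRange_one]
  rw [List.map_map]
  have h1 : ((i : Int) + 1 - 0).toNat = i + 1 := by omega
  rw [h1]
  simp only [Function.comp_def, zero_add, PySem.List.pyGetD_natCast]
  exact take_eq_map_range l (i+1) (by omega)

-- each new prefix is longer than every key already present, so A's try-branch never fires
theorem pv_key_not_mem (l : List Char) (n : Nat) (hn : n < l.length) :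
    String.ofList (l.take (n + 1)) ∉ (pvPrefixItems l n).map Prod.fst := by
  simp only [pvPrefixItems, List.map_map, List.mem_map, Function.comp_def, List.mem_range, not_exists]
  rintro i ⟨hi, heq⟩
  have : (l.take (i+1)).length = (l.take (n+1)).length := by
    have := congrArg String.length heq
    simpa using this
  simp [List.length_take] at this
  omega

theorem pv_A_dict (l : List Char) (n : Nat) (hn : n ≤ l.length) :
    ((PySem.List.pyRange 0 (n : Int) 1).foldl (fun d i =>
      let sub : List Char :=
        (PySem.List.pyRange 0 (i + 1) 1).foldl (fun acc j => acc ++ [PySem.List.pyGetD l j ' ']) []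
      let key := String.ofList sub
      match d.get? key with
      | some v => d.insert key (v + 1)
      | none => d.insert key 1) (PySem.Dict.empty : PySem.Dict String Int))
    = PySem.Dict.mk (pvPrefixItems l n) := by
  induction n with
  | zero => simp [PySem.List.pyRange_one_eq_nil, pvPrefixItems]; rfl
  | succ n ih =>
    have hn' : n ≤ l.length := by omega
    have hrange : PySem.List.pyRange 0 ((n+1 : Nat) : Int) 1
        = PySem.List.pyRange 0 (n : Int) 1 ++ [(n : Int)] := by
      have := PySem.List.pyRange_one_succ_right (a := 0) (b := (n : Int)) (by positivity)
      simpa [Nat.cast_add] using this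
    rw [hrange, List.foldl_append, ih hn']
    simp only [List.foldl_cons, List.foldl_nil]
    rw [pv_inner l n (by omega)]
    have hkey : (PySem.Dict.mk (pvPrefixItems l n)).get? (String.ofList (l.take (n+1))) = none := by
      rw [PySem.Dict.get?_eq_none_iff_not_mem_keys]
      simpa [PySem.Dict.keys_mk] using pv_key_not_mem l n (by omega)
    rw [hkey]
    apply PySem.Dict.ext
    rw [PySem.Dict.items_insert_of_not_contains]
    · simp [pvPrefixItems, List.range_succ]
    · rw [PySem.Dict.contains_eq_isSome_get?, hkey]; rfl

theorem pv_B_dict (l : List Char) (d : PySem.Dict String Int) (sub : List Char)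
    (hnd : d.keys.Nodup)
    (hfresh : ∀ k ∈ d.keys, k.length ≤ sub.length) :
    ((l.foldl (fun (p : PySem.Dict String Int × String) c =>
        let s := p.2.push c
        (p.1.insert s 1, s)) (d, String.ofList sub)).1).items
    = d.items ++ (List.range l.length).map (fun i => (String.ofList (sub ++ l.take (i + 1)), 1)) := by
  induction l generalizing d sub with
  | nil => simp
  | cons c l ih =>
    simp only [List.foldl_cons]
    have hpush : (String.ofList sub).push c = String.ofList (sub ++ [c]) := by
      simp [String.push, String.ofList]
    have hnc : d.contains (String.ofList (sub ++ [c])) = false := by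
      rw [PySem.Dict.contains_eq_decide_mem_keys]
      simp only [decide_eq_false_iff_not]
      intro hmem
      have h1 := hfresh _ hmem
      rw [String.length_ofList] at h1
      simp at h1
    rw [hpush]
    rw [ih (d.insert (String.ofList (sub ++ [c])) 1) (sub ++ [c])
      (PySem.Dict.nodup_keys_insert _ _ _ hnd)
      ?_]
    · rw [PySem.Dict.items_insert_of_not_contains (h := hnc)]
      simp only [List.length_cons, List.append_assoc]
      rw [List.range_succ_eq_map]
      simp only [List.map_cons, List.map_map, Function.comp_def, List.take_zero, List.take_succ_cons]
      simp
    · intro k hk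
      rw [PySem.Dict.mem_keys_insert] at hk
      rcases hk with rfl | hk
      · simp
      · have := hfresh _ hk; simp; omega

-- ===== VERDICT (by name: the statement is the Claim_ definition above) =====
theorem all_string_spec : Claim_equal_all_string := by
  intro original_str string1 _
  unfold Spec_all_string all_string all_string_alt
  have hA := pv_A_dict string1.toList string1.toList.length le_rfl
  simp only [hA]
  have hB := pv_B_dict string1.toList PySem.Dict.empty []
    (by simpa using PySem.Dict.nodup_keys_empty (κ := String) (ν := Int))
    (by simp [PySem.Dict.keys_empty])
  simp only [String.ofList_nil] at hB
  rw [hB]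
  simp [pvPrefixItems, PySem.Dict.empty]
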